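-- pv_equiv track=rewrite | github.com/MohiuddinSohel/Leetcoding | amazonOAPreparation/OA.py | count_discount_pairs_optimized
-- ===== SOURCE A (Python) =====
-- from collections import defaultdict, Counter, deque
--
-- def count_discount_pairs_optimized(prices):
--     """Count pairs (i, j) where i < j and (prices[i] + prices[j]) is a power of three using a hashmap."""
--     # https://leetcode.com/company/amazon/discuss/6032414/Amazon-or-OA-SDE-II-or-11082024
--     count = 0
--     freq = defaultdict(int)
--     max_price = max(prices)
--
--     # Precompute all possible powers of three within the sum range
--     powers_of_three = []
--     power = 1
--     while power <= 2 * max_price: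
--         powers_of_three.append(power)
--         power *= 3
--
--     # Traverse prices and use hashmap to count valid pairs
--     for price in prices:
--         for power in powers_of_three:
--             complement = power - price
--             if complement in freq:
--                 count += freq[complement]
--         freq[price] += 1
--
--     return count
-- ===== SOURCE B (Python) =====
-- def count_discount_pairs_optimized(prices):
--     """Count pairs (i, j) where i < j and (prices[i] + prices[j]) is a power of three."""
--     total = 0
--     seen = []
--     for x in prices:
--         for y in seen:
--             if _is_power_of_three(x + y):
--                 total += 1
--         seen.append(x)
--     return total
--
--
-- def _is_power_of_three(n):
--     while n > 1 and n % 3 == 0: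
--         n //= 3
--     return n == 1
-- ===== Notes on version B (the rewrite author's own statement) =====
-- stated objective: simpler
-- what changed: Replaces the precomputed powers-of-three list plus frequency hashmap with a plain scan over previously seen prices testing each pair sum directly with a divide-by-3 power-of-three check; no max(), no dict, no powers list.
import Mathlib
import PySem

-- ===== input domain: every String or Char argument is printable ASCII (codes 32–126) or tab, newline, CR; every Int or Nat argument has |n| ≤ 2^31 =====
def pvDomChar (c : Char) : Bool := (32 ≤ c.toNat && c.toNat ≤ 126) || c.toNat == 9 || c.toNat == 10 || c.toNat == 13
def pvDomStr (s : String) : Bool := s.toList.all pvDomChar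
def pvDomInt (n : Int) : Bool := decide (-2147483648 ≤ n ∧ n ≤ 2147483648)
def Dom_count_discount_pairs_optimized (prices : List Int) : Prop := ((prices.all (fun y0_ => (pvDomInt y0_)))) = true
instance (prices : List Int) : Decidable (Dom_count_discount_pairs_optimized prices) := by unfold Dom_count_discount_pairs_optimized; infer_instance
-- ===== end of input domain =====

-- B replaces the powers-of-three list + frequency hashmap with a direct scan over earlier
-- prices testing each pair sum with a divide-by-3 power check (objective: simpler).

-- ===== PORT A =====
-- 'while power <= 2*max_price: powers.append(power); power *= 3' starting from power = 1.
-- The '1 ≤ power' conjunct is a totality guard only: it holds invariantly (start 1, ×3 each step).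
def pvBuildPowers (limit power : Int) : List Int :=
  if _h : 1 ≤ power ∧ power ≤ limit then power :: pvBuildPowers limit (power * 3) else []
  termination_by (limit + 1 - power).toNat
  decreasing_by omega

def count_discount_pairs_optimized (prices : List Int) : Int :=
  match PySem.List.max? prices (fun y => y) with
  | none => 0  -- Python: max() raises ValueError here; excluded by Pre_
  | some max_price =>
    let powers := pvBuildPowers (2 * max_price) 1
    (prices.foldl (fun st price =>
        ((powers.foldl (fun c power =>
            if st.2.contains (power - price) then c + st.2.getD (power - price) 0 else c) st.1),
         st.2.modify price 0 (· + 1)))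
      ((0 : Int), (PySem.Dict.empty : PySem.Dict Int Int))).1

-- ===== PORT B =====
-- 'while n > 1 and n % 3 == 0: n //= 3'
def pvPow3Loop (n : Int) : Int :=
  if _h : 1 < n ∧ PySem.Int.mod n 3 = 0 then pvPow3Loop (PySem.Int.floordiv n 3) else n
  termination_by n.toNat
  decreasing_by
    have := PySem.Int.floordiv_mul_add_mod n 3
    omega

def pvIsPow3 (n : Int) : Bool := pvPow3Loop n == 1

def count_discount_pairs_optimized_alt (prices : List Int) : Int :=
  (prices.foldl (fun st x =>
      (st.2.foldl (fun t y => if pvIsPow3 (x + y) then t + 1 else t) st.1,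
       st.2 ++ [x]))
    ((0 : Int), ([] : List Int))).1

-- ===== PRECONDITION & SPEC =====
-- Python's max() raises ValueError on the empty list; that is the only input A raises on.
def Pre_count_discount_pairs_optimized (prices : List Int) : Prop := prices ≠ []
instance (prices : List Int) : Decidable (Pre_count_discount_pairs_optimized prices) := by unfold Pre_count_discount_pairs_optimized; infer_instance
def pvWitness_count_discount_pairs_optimized : List Int := [1, 2, 8, -5]

def Spec_count_discount_pairs_optimized (prices : List Int) (out : Int) : Prop := out = count_discount_pairs_optimized_alt prices
instance (prices : List Int) (out : Int) : Decidable (Spec_count_discount_pairs_optimized prices out) := by unfold Spec_count_discount_pairs_optimized; infer_instance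

-- ===== CLAIM (what is proved, stated in full; the proofs are below) =====
def Claim_equal_count_discount_pairs_optimized : Prop := ∀ (prices : List Int), Dom_count_discount_pairs_optimized prices → Pre_count_discount_pairs_optimized prices → Spec_count_discount_pairs_optimized prices (count_discount_pairs_optimized prices)

-- ===== LEMMAS AND PROOFS =====

-- pvPow3Loop returns 1 exactly on the powers of three
lemma pvPow3Loop_eq_one_iff (n : Int) : pvPow3Loop n = 1 ↔ ∃ k : ℕ, n = 3 ^ k := by
  induction n using pvPow3Loop.induct with
  | case1 n h ih =>
    obtain ⟨h1, h3⟩ := h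
    have hq := PySem.Int.floordiv_mul_add_mod n 3
    rw [pvPow3Loop, dif_pos ⟨h1, h3⟩, ih]
    constructor
    · rintro ⟨k, hk⟩; exact ⟨k + 1, by rw [pow_succ]; omega⟩
    · rintro ⟨k, hk⟩
      cases k with
      | zero => omega
      | succ k => exact ⟨k, by rw [pow_succ] at hk; omega⟩
  | case2 n h =>
    rw [pvPow3Loop, dif_neg h]
    constructor
    · intro h1; exact ⟨0, by simpa using h1⟩
    · rintro ⟨k, rfl⟩
      cases k with
      | zero => simp
      | succ k =>
        exfalso
        have h1 : (1:Int) < 3 ^ (k+1) := by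
          have : (3:Int)^1 ≤ 3^(k+1) := pow_le_pow_right₀ (by norm_num) (by omega)
          linarith
        have h3 : PySem.Int.mod ((3:Int) ^ (k+1)) 3 = 0 :=
          (PySem.Int.mod_eq_zero_iff_dvd _ _).mpr (dvd_pow_self 3 (by omega))
        exact h ⟨h1, h3⟩

lemma pvIsPow3_iff (n : Int) : pvIsPow3 n = true ↔ ∃ k : ℕ, n = 3 ^ k := by
  simp only [pvIsPow3, beq_iff_eq]
  exact pvPow3Loop_eq_one_iff n

-- membership in the powers list
lemma mem_pvBuildPowers (limit power : Int) :
    ∀ s : Int, 1 ≤ power → (s ∈ pvBuildPowers limit power ↔ ∃ k : ℕ, s = power * 3 ^ k ∧ s ≤ limit) := by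
  induction power using pvBuildPowers.induct (limit := limit) with
  | case1 power h ih =>
    intro s _
    rw [pvBuildPowers, dif_pos h, List.mem_cons, ih s (by omega)]
    constructor
    · rintro (rfl | ⟨k, hk, hle⟩)
      · exact ⟨0, by simp, h.2⟩
      · exact ⟨k + 1, by rw [pow_succ]; ring_nf; ring_nf at hk; omega, hle⟩
    · rintro ⟨k, hk, hle⟩
      cases k with
      | zero => left; simpa using hk
      | succ k => right; exact ⟨k, by rw [pow_succ] at hk; ring_nf; ring_nf at hk; omega, hle⟩
  | case2 power h =>
    intro s hp
    rw [pvBuildPowers, dif_neg h]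
    simp only [List.not_mem_nil, false_iff]
    rintro ⟨k, rfl, hle⟩
    have h1 : (1:Int) ≤ 3 ^ k := one_le_pow₀ (by norm_num)
    have : power ≤ power * 3 ^ k := le_mul_of_one_le_right (by omega) h1
    exact h ⟨hp, by omega⟩

lemma forall_pvBuildPowers_le (limit power : Int) :
    ∀ s ∈ pvBuildPowers limit power, power ≤ s := by
  induction power using pvBuildPowers.induct (limit := limit) with
  | case1 power h ih =>
    rw [pvBuildPowers, dif_pos h]
    intro s hs
    rcases List.mem_cons.mp hs with rfl | hs
    · exact le_refl _
    · have := ih s hs; omega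
  | case2 power h =>
    rw [pvBuildPowers, dif_neg h]; simp

lemma pairwise_pvBuildPowers (limit power : Int) :
    (pvBuildPowers limit power).Pairwise (· < ·) := by
  induction power using pvBuildPowers.induct (limit := limit) with
  | case1 power h ih =>
    rw [pvBuildPowers, dif_pos h]
    refine List.Pairwise.cons (fun s hs => ?_) ih
    have := forall_pvBuildPowers_le limit (power * 3) s hs
    omega
  | case2 power h =>
    rw [pvBuildPowers, dif_neg h]; exact List.Pairwise.nil

lemma nodup_pvBuildPowers (limit power : Int) : (pvBuildPowers limit power).Nodup :=
  (pairwise_pvBuildPowers limit power).imp ne_of_lt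

-- a 0/1 indicator sum over a Nodup list is the membership indicator
lemma sum_map_indicator {l : List Int} (hnd : l.Nodup) (s : Int) :
    (l.map (fun p => if p = s then (1 : Int) else 0)).sum = if s ∈ l then (1 : Int) else 0 := by
  induction l with
  | nil => simp
  | cons a t ih =>
    rcases List.nodup_cons.mp hnd with ⟨ha, hnd'⟩
    by_cases h : a = s
    · subst h
      simp [List.mem_cons, ih hnd', if_neg (fun hh => ha hh)]
    · simp only [List.map_cons, List.sum_cons, if_neg h, ih hnd', List.mem_cons, zero_add]
      have hns : ¬ s = a := fun hh => h hh.symm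
      by_cases hm : s ∈ t
      · simp [hm]
      · simp [hm, hns]

-- bridge: on sums bounded by the powers limit, membership in A's powers list is B's power test
lemma mem_powers_iff_isPow3 (m s : Int) (hs : s ≤ 2 * m) :
    (s ∈ pvBuildPowers (2 * m) 1) ↔ pvIsPow3 s = true := by
  rw [mem_pvBuildPowers (2 * m) 1 s (le_refl 1), pvIsPow3_iff]
  constructor
  · rintro ⟨k, hk, _⟩; exact ⟨k, by omega⟩
  · rintro ⟨k, rfl⟩; exact ⟨k, by omega, hs⟩

-- double counting: the powers-list scan of counts equals the seen-list scan of indicators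
lemma count_sum_eq (m x : Int) (seen : List Int) (hx : x ≤ m) (hseen : ∀ y ∈ seen, y ≤ m) :
    ((pvBuildPowers (2 * m) 1).map (fun p => ((seen.count (p - x) : Nat) : Int))).sum
    = (seen.map (fun y => if pvIsPow3 (x + y) then (1 : Int) else 0)).sum := by
  induction seen with
  | nil => simp
  | cons y t ih =>
    have hy : y ≤ m := hseen y (by simp)
    have ht : ∀ z ∈ t, z ≤ m := fun z hz => hseen z (by simp [hz])
    have hcnt : ∀ p ∈ pvBuildPowers (2 * m) 1,
        (((y :: t).count (p - x) : Nat) : Int)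
        = ((t.count (p - x) : Nat) : Int) + (if p = x + y then (1 : Int) else 0) := by
      intro p _
      rw [List.count_cons]
      by_cases h : p = x + y
      · have hb : ((p - x) == y) = true := by simp only [beq_iff_eq]; omega
        simp [h]
      · have hb : ((p - x) == y) = false := by simp only [beq_eq_false_iff_ne, ne_eq]; omega
        simp [h]
        omega
    rw [List.map_congr_left hcnt, PySem.List.sum_map_add_int, ih ht,
        sum_map_indicator (nodup_pvBuildPowers (2 * m) 1) (x + y)]
    have hb : ((x + y) ∈ pvBuildPowers (2 * m) 1) ↔ pvIsPow3 (x + y) = true :=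
      mem_powers_iff_isPow3 m (x + y) (by omega)
    simp only [List.map_cons, List.sum_cons]
    by_cases hp : pvIsPow3 (x + y) = true
    · simp [hp, hb.mpr hp]; ring
    · have : (x + y) ∉ pvBuildPowers (2 * m) 1 := fun hm' => hp (hb.mp hm')
      simp [hp, this]

-- the per-element increments of A's and B's inner loops agree
lemma inner_eq (m x : Int) (seen : List Int) (c : Int)
    (hx : x ≤ m) (hseen : ∀ y ∈ seen, y ≤ m) :
    (pvBuildPowers (2 * m) 1).foldl (fun c p =>
        if (PySem.Dict.counter seen).contains (p - x) then c + (PySem.Dict.counter seen).getD (p - x) 0 else c) c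
    = seen.foldl (fun t y => if pvIsPow3 (x + y) then t + 1 else t) c := by
  have ha : (pvBuildPowers (2 * m) 1).foldl (fun c p =>
        if (PySem.Dict.counter seen).contains (p - x) then c + (PySem.Dict.counter seen).getD (p - x) 0 else c) c
      = (pvBuildPowers (2 * m) 1).foldl (fun c p => c + ((seen.count (p - x) : Nat) : Int)) c := by
    apply PySem.List.foldl_congr_mem
    intro acc p _
    rw [PySem.Dict.contains_counter, PySem.Dict.getD_counter]
    by_cases h : (p - x) ∈ seen
    · have hc : seen.contains (p - x) = true := by simpa using h
      simp
      exact fun h' => absurd h h' 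
    · have hc : seen.contains (p - x) = false := by simpa using h
      have hz : seen.count (p - x) = 0 := List.count_eq_zero.mpr h
      simp [hz]
  have hb : seen.foldl (fun t y => if pvIsPow3 (x + y) then t + 1 else t) c
      = seen.foldl (fun t y => t + (if pvIsPow3 (x + y) then (1 : Int) else 0)) c := by
    apply PySem.List.foldl_congr_mem
    intro acc y _
    by_cases h : pvIsPow3 (x + y) = true <;> simp [h]
  rw [ha, hb, PySem.List.foldl_add, PySem.List.foldl_add, count_sum_eq m x seen hx hseen]

lemma main_fold (m : Int) (rest : List Int) :
    ∀ (c : Int) (seen : List Int), (∀ y ∈ rest, y ≤ m) → (∀ y ∈ seen, y ≤ m) →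
    (rest.foldl (fun st price =>
        (((pvBuildPowers (2 * m) 1).foldl (fun c power =>
            if st.2.contains (power - price) then c + st.2.getD (power - price) 0 else c) st.1),
         st.2.modify price 0 (· + 1)))
      (c, PySem.Dict.counter seen)).1
    = (rest.foldl (fun st x =>
        (st.2.foldl (fun t y => if pvIsPow3 (x + y) then t + 1 else t) st.1,
         st.2 ++ [x])) (c, seen)).1 := by
  induction rest with
  | nil => intro c seen _ _; rfl
  | cons x rs ih =>
    intro c seen hrest hseen
    have hx : x ≤ m := hrest x (by simp)
    have hrs : ∀ y ∈ rs, y ≤ m := fun y hy => hrest y (by simp [hy])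
    have hseen' : ∀ y ∈ seen ++ [x], y ≤ m := by
      intro y hy
      rcases List.mem_append.mp hy with h | h
      · exact hseen y h
      · simp at h; omega
    simp only [List.foldl_cons]
    rw [inner_eq m x seen c hx hseen, ← PySem.Dict.counter_append_singleton]
    exact ih _ (seen ++ [x]) hrs hseen'

-- ===== VERDICT (by name: the statement is the Claim_ definition above) =====
theorem count_discount_pairs_optimized_spec : Claim_equal_count_discount_pairs_optimized := by
  intro prices _ hpre
  unfold Spec_count_discount_pairs_optimized count_discount_pairs_optimized count_discount_pairs_optimized_alt
  cases hmax : PySem.List.max? prices (fun y => y) with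
  | none => exact absurd ((PySem.List.max?_eq_none_iff prices _).mp hmax) hpre
  | some m =>
    have hle : ∀ y ∈ prices, y ≤ m := PySem.List.max?_isMax hmax
    simpa using main_fold m prices 0 [] hle (by simp)
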